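-- pv_equiv track=rewrite | github.com/rjrobert/daily_coding_problems | daily9.py | max_sum_helper
-- ===== SOURCE A (Python) =====
-- def max_sum_helper(nums, curr_idx, curr_len, maxNums):
--     if maxNums[curr_idx] != 0:
--         return maxNums[curr_idx]
--     if curr_idx in [0, 1]:
--         return nums[curr_idx]
--     if curr_idx - 2 == 0:
--         return nums[curr_idx] + max_sum_helper(nums, curr_idx - 2, curr_len, maxNums)
--
--     return nums[curr_idx] + max(max_sum_helper(nums, curr_idx - 2, curr_len, maxNums),
--                                 max_sum_helper(nums, curr_idx - 2, curr_len, maxNums))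
-- ===== SOURCE B (Python) =====
-- def max_sum_helper(nums, curr_idx, curr_len, maxNums):
--     # Two staged passes instead of A's recursion: first locate the stopping
--     # index of the stride-2 chain, then sum nums over the chain with range().
--     stop = curr_idx
--     while maxNums[stop] == 0 and stop != 0 and stop != 1:
--         stop -= 2
--     tail = maxNums[stop] if maxNums[stop] != 0 else nums[stop]
--     return sum(nums[i] for i in range(curr_idx, stop, -2)) + tail
-- ===== Notes on version B (the rewrite author's own statement) =====
-- stated objective: alternative
-- what changed: Replaced A's branching recursion (which calls itself twice with identical arguments under max(f(i-2),f(i-2))) by two staged linear passes: a loop that finds the stopping index of the stride-2 chain, then a direct sum of nums over range(curr_idx, stop, -2).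
import Mathlib
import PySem

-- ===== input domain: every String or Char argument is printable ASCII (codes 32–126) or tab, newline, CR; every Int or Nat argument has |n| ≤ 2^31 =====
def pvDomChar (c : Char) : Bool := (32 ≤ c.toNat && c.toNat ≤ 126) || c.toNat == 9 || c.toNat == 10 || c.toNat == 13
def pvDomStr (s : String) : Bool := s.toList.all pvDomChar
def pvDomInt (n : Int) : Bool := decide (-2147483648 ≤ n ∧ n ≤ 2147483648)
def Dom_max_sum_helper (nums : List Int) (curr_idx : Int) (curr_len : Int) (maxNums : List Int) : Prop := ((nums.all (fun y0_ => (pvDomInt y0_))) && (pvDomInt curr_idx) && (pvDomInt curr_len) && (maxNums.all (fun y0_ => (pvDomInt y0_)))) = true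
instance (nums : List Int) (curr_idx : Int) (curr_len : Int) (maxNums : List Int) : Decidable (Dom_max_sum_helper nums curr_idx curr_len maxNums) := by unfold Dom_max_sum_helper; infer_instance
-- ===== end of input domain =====

-- B replaces A's branching recursion by two staged passes: find the stopping
-- index of the stride-2 chain, then sum nums directly over a range (objective:
-- a genuinely different decomposition; a timing run reported no speed-up).

-- ===== PORT A =====
-- Fuel only makes the unbounded Int recursion total; curr_idx.natAbs + maxNums.length + 1
-- is never exhausted (proved in maxSumGoA_eq's hypotheses).  pyGet? = none is
-- Python's IndexError (A raises there; the returned 0 is unreachable on returning runs).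
def maxSumGoA (nums maxNums : List Int) (i : Int) : Nat → Int
  | 0 => 0
  | fuel + 1 =>
    match PySem.List.pyGet? maxNums i with
    | none => 0
    | some m =>
      if m ≠ 0 then m
      else if i = 0 ∨ i = 1 then (PySem.List.pyGet? nums i).getD 0
      else if i - 2 = 0 then
        (PySem.List.pyGet? nums i).getD 0 + maxSumGoA nums maxNums (i - 2) fuel
      else
        (PySem.List.pyGet? nums i).getD 0 +
          max (maxSumGoA nums maxNums (i - 2) fuel) (maxSumGoA nums maxNums (i - 2) fuel)

def max_sum_helper (nums : List Int) (curr_idx : Int) (curr_len : Int) (maxNums : List Int) : Int :=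
  maxSumGoA nums maxNums curr_idx (curr_idx.natAbs + maxNums.length + 1)

-- ===== PORT B =====
-- Pass 1 of Source B: the while loop locating the stopping index of the chain.
-- Where the Python loop raises (IndexError on maxNums[stop]) the port stops at
-- that index (unreachable inside Pre_); the fuel is never exhausted.
def findStop (maxNums : List Int) (i : Int) : Nat → Int
  | 0 => i
  | fuel + 1 =>
    match PySem.List.pyGet? maxNums i with
    | none => i
    | some m => if m = 0 ∧ i ≠ 0 ∧ i ≠ 1 then findStop maxNums (i - 2) fuel else i

-- 'tail = maxNums[stop] if maxNums[stop] != 0 else nums[stop]' of Source B.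
def tailVal (nums maxNums : List Int) (j : Int) : Int :=
  match PySem.List.pyGet? maxNums j with
  | none => 0
  | some m => if m ≠ 0 then m else (PySem.List.pyGet? nums j).getD 0

-- Pass 2 of Source B: 'sum(nums[i] for i in range(curr_idx, stop, -2)) + tail'.
def max_sum_helper_alt (nums : List Int) (curr_idx : Int) (curr_len : Int) (maxNums : List Int) : Int :=
  let stop := findStop maxNums curr_idx (curr_idx.natAbs + maxNums.length + 1)
  (PySem.List.pyRange curr_idx stop (-2)).foldl
      (fun acc i => acc + (PySem.List.pyGet? nums i).getD 0) 0
    + tailVal nums maxNums stop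

-- ===== PRECONDITION & SPEC =====
-- Exactly the inputs on which Python A returns: the stride-2 index chain
-- curr_idx, curr_idx-2, ... reaches a non-zero maxNums entry or index 0/1
-- after k steps, with every visited index in (Python, wraparound) range of
-- maxNums and of nums where nums is read.  (k ≤ len maxNums always suffices.)
def Pre_max_sum_helper (nums : List Int) (curr_idx : Int) (curr_len : Int) (maxNums : List Int) : Prop :=
  ∃ k : Nat, k ≤ maxNums.length ∧
    (∀ j : Nat, j < k →
      PySem.Raise.InRange maxNums.length (curr_idx - 2*(j:Int)) ∧
      (PySem.List.pyGet? maxNums (curr_idx - 2*(j:Int))).getD 0 = 0 ∧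
      curr_idx - 2*(j:Int) ≠ 0 ∧ curr_idx - 2*(j:Int) ≠ 1 ∧
      PySem.Raise.InRange nums.length (curr_idx - 2*(j:Int))) ∧
    PySem.Raise.InRange maxNums.length (curr_idx - 2*(k:Int)) ∧
    ((PySem.List.pyGet? maxNums (curr_idx - 2*(k:Int))).getD 0 ≠ 0 ∨
      ((curr_idx - 2*(k:Int) = 0 ∨ curr_idx - 2*(k:Int) = 1) ∧
        PySem.Raise.InRange nums.length (curr_idx - 2*(k:Int))))

instance (nums : List Int) (curr_idx : Int) (curr_len : Int) (maxNums : List Int) : Decidable (Pre_max_sum_helper nums curr_idx curr_len maxNums) := by unfold Pre_max_sum_helper; infer_instance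

def pvWitness_max_sum_helper : List Int × Int × Int × List Int := ([1, 2, 3], 2, 3, [0, 0, 0])

def Spec_max_sum_helper (nums : List Int) (curr_idx : Int) (curr_len : Int) (maxNums : List Int) (out : Int) : Prop := out = max_sum_helper_alt nums curr_idx curr_len maxNums
instance (nums : List Int) (curr_idx : Int) (curr_len : Int) (maxNums : List Int) (out : Int) : Decidable (Spec_max_sum_helper nums curr_idx curr_len maxNums out) := by unfold Spec_max_sum_helper; infer_instance

-- ===== CLAIM (what is proved, stated in full; the proofs are below) =====
def Claim_equal_max_sum_helper : Prop := ∀ (nums : List Int) (curr_idx : Int) (curr_len : Int) (maxNums : List Int), Dom_max_sum_helper nums curr_idx curr_len maxNums → Pre_max_sum_helper nums curr_idx curr_len maxNums → Spec_max_sum_helper nums curr_idx curr_len maxNums (max_sum_helper nums curr_idx curr_len maxNums)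

-- ===== LEMMAS AND PROOFS =====

theorem pyRange_neg2_nil (a : Int) : PySem.List.pyRange a a (-2) = [] := by
  simp [PySem.List.pyRange]

theorem pyRange_neg2_cons (a b : Int) (h : b ≤ a - 2) :
    PySem.List.pyRange a b (-2) = a :: PySem.List.pyRange (a - 2) b (-2) := by
  have h1 : b < a := by omega
  by_cases hb2 : b < a - 2
  · simp only [PySem.List.pyRange]
    norm_num [h1, hb2]
    have hcount : ((a - b + 2 - 1) / 2).toNat = ((a - 2 - b + 2 - 1) / 2).toNat + 1 := by
      omega
    rw [hcount, List.range_succ_eq_map]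
    simp only [List.map_cons, List.map_map]
    congr 1
    · norm_num
    · refine List.map_congr_left (fun k _ => ?_)
      simp only [Function.comp_apply]
      push_cast
      ring
  · have hb : b = a - 2 := by omega
    subst hb
    simp only [PySem.List.pyRange]
    norm_num

theorem findStop_le (maxNums : List Int) : ∀ (fuel : Nat) (i : Int),
    findStop maxNums i fuel ≤ i := by
  intro fuel
  induction fuel with
  | zero => intro i; simp [findStop]
  | succ f ih =>
    intro i
    simp only [findStop]
    cases PySem.List.pyGet? maxNums i with
    | none => exact le_refl i
    | some m =>
      by_cases h : m = 0 ∧ i ≠ 0 ∧ i ≠ 1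
      · simp only [if_pos h]; have := ih (i - 2); omega
      · simp [h]

theorem pyGet?_none_of_lt_neg (xs : List Int) (i : Int) (h : i < -(xs.length : Int)) :
    PySem.List.pyGet? xs i = none := by
  have h0 : ¬ (0 ≤ i) := by omega
  have h1 : ¬ (-(xs.length : Int) ≤ i) := by omega
  simp [PySem.List.pyGet?, PySem.List.pyIdx?, h0, h1]

-- Main invariant: with enough fuel (in the sense of the two bounds, which the
-- top-level fuel satisfies and which are preserved down the recursion), A's
-- recursion equals B's chain sum plus B's tail value at B's stopping index.
theorem maxSumGoA_eq (nums maxNums : List Int) : ∀ (fuel : Nat) (i : Int),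
    i < 2 * (fuel : Int) → i + 2 * (maxNums.length : Int) < 2 * (fuel : Int) →
    maxSumGoA nums maxNums i fuel =
      (PySem.List.pyRange i (findStop maxNums i fuel) (-2)).foldl
          (fun acc j => acc + (PySem.List.pyGet? nums j).getD 0) 0
        + tailVal nums maxNums (findStop maxNums i fuel) := by
  intro fuel
  induction fuel with
  | zero =>
    intro i h1 h2
    have hn : PySem.List.pyGet? maxNums i = none := by
      apply pyGet?_none_of_lt_neg; omega
    simp [maxSumGoA, findStop, pyRange_neg2_nil, tailVal, hn]
  | succ f ih =>
    intro i h1 h2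
    cases hg : PySem.List.pyGet? maxNums i with
    | none => simp [maxSumGoA, findStop, pyRange_neg2_nil, tailVal, hg]
    | some m =>
      by_cases hc : m = 0 ∧ i ≠ 0 ∧ i ≠ 1
      · -- continue: A adds nums[i] and recurses; B's stop is the stop of i-2.
        obtain ⟨hm0, hi0, hi1⟩ := hc
        have hnot : ¬ m ≠ 0 := by simp [hm0]
        have hstop := findStop_le maxNums f (i - 2)
        have hcons := pyRange_neg2_cons i (findStop maxNums (i - 2) f) (by omega)
        have hrec := ih (i - 2) (by omega) (by omega)
        have h01 : ¬ (i = 0 ∨ i = 1) := by omega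
        simp only [maxSumGoA, findStop, hg]
        rw [if_neg hnot, if_neg h01, if_pos (And.intro hm0 (And.intro hi0 hi1))]
        rw [hcons]
        simp only [max_self, ite_self]
        rw [hrec]
        simp [PySem.List.foldl_add, add_assoc]
      · -- stop here: B's stop is i itself.
        have : ¬ (m = 0 ∧ i ≠ 0 ∧ i ≠ 1) := hc
        simp only [maxSumGoA, findStop, hg]
        simp only [if_neg this, pyRange_neg2_nil, List.foldl_nil, tailVal, hg]
        by_cases hm : m ≠ 0
        · simp [hm]
        · have hm0 : m = 0 := by omega
          have h01 : i = 0 ∨ i = 1 := by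
            by_contra hno; push_neg at hno; exact hc ⟨hm0, hno.1, hno.2⟩
          simp [hm0, h01]

theorem max_sum_helper_eq_alt (nums : List Int) (curr_idx : Int) (curr_len : Int) (maxNums : List Int) :
    max_sum_helper nums curr_idx curr_len maxNums = max_sum_helper_alt nums curr_idx curr_len maxNums := by
  have h := maxSumGoA_eq nums maxNums (curr_idx.natAbs + maxNums.length + 1) curr_idx
    (by omega) (by omega)
  simpa [max_sum_helper, max_sum_helper_alt] using h

-- ===== VERDICT (by name: the statement is the Claim_ definition above) =====
theorem max_sum_helper_spec : Claim_equal_max_sum_helper := by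
  intro nums curr_idx curr_len maxNums _ _
  exact max_sum_helper_eq_alt nums curr_idx curr_len maxNums
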